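-- pv_equiv track=rewrite | github.com/dataOtter/CodeFights-Python3 | problems_integers.py | rounders
-- ===== SOURCE A (Python) =====
-- def rounders(value):
--     """Input: positive integer value. Guaranteed constraints: 1 ≤ value ≤ 108.
--     Output: Returns integer, the rounded number."""
--     l = list(str(value))
--     i = len(l) - 1
--     while i > 0:
--         if int(l[i]) >= 5:
--             l[i - 1] = str(int(l[i - 1]) + 1)
--         l[i] = '0'
--         i -= 1
--     v = ''.join(l)
--     return v
-- ===== SOURCE B (Python) =====
-- def rounders(value):
--     """Input: positive integer value. Guaranteed constraints: 1 <= value <= 10**8.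
--     Output: Returns integer, the rounded number."""
--     n = value
--     mult = 1
--     while n >= 10:
--         d = n % 10
--         n //= 10
--         if d >= 5:
--             n += 1
--         mult *= 10
--     return str(n * mult)
-- ===== Notes on version B (the rewrite author's own statement) =====
-- stated objective: simpler
-- what changed: Replaces the char-list mutation over str(value) (indexing, int()/str() conversions, zero-filling each slot) with pure integer arithmetic: a while-loop that splits off the last digit with divmod, carries when that digit rounds up, and rebuilds the magnitude with a power-of-ten multiplier.
-- outside the precondition, e.g. on rounders(-15): A returns '-00', B returns '-15'; on rounders(-123): A returns '-000', B returns '-123'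
import Mathlib
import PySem

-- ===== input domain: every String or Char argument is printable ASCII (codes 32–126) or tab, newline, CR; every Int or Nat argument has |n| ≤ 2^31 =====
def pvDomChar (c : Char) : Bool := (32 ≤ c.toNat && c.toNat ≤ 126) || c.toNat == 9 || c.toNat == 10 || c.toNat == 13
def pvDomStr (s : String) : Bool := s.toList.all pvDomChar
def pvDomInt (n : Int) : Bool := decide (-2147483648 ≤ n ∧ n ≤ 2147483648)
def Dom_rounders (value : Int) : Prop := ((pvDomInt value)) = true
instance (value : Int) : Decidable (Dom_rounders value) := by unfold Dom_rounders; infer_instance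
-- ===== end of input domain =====

-- B replaces A's char-list mutation over str(value) by pure integer div/mod arithmetic with a
-- power-of-ten multiplier (objective: simpler).

-- ===== PORT A =====
-- int(s); the .getD 0 default is unreachable under Pre_rounders (every slot A parses is a decimal numeral)
def pyIntD (s : String) : Int := (PySem.Int.ofStr? s).getD 0

-- the while-loop 'while i > 0: … ; i -= 1' as structural recursion on i (i stays ≥ 0 throughout)
def roundLoop : List String → Nat → List String
  | l, 0 => l
  | l, i+1 =>
    let l1 := if 5 ≤ pyIntD (l.getD (i+1) "") then
                l.set i (PySem.Int.toStr (pyIntD (l.getD i "") + 1))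
              else l
    roundLoop (l1.set (i+1) "0") i

def rounders (value : Int) : String :=
  let l := (PySem.Int.toStr value).toList.map (fun c => String.ofList [c])
  PySem.Str.join "" (roundLoop l (l.length - 1))

-- ===== PORT B =====
-- the while-loop 'while n >= 10' with a fuel bound (n strictly decreases each step, so
-- value.toNat + 1 iterations always suffice; the fuel only makes the recursion structural)
def altLoop : Nat → Int → Int → Int × Int
  | 0, n, mult => (n, mult)
  | f+1, n, mult =>
    if 10 ≤ n then
      let d := PySem.Int.mod n 10
      let n1 := PySem.Int.floordiv n 10
      let n2 := if 5 ≤ d then n1 + 1 else n1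
      altLoop f n2 (mult * 10)
    else (n, mult)

def rounders_alt (value : Int) : String :=
  let p := altLoop (value.toNat + 1) value 1
  PySem.Int.toStr (p.1 * p.2)

-- ===== PRECONDITION & SPEC =====
-- Pre_ excludes negative values, outside the function's documented domain (1 ≤ value ≤ 10^8): there A
-- either raises ValueError from int('-') or returns a malformed numeral such as '-00'.
def Pre_rounders (value : Int) : Prop := 0 ≤ value
instance (value : Int) : Decidable (Pre_rounders value) := by unfold Pre_rounders; infer_instance
def pvWitness_rounders : Int := (1234)

def Spec_rounders (value : Int) (out : String) : Prop := out = rounders_alt value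
instance (value : Int) (out : String) : Decidable (Spec_rounders value out) := by unfold Spec_rounders; infer_instance

-- ===== CLAIM (what is proved, stated in full; the proofs are below) =====
def Claim_equal_rounders : Prop := ∀ (value : Int), Dom_rounders value → Pre_rounders value → Spec_rounders value (rounders value)

-- ===== LEMMAS AND PROOFS =====

-- the carry process both programs implement: process the big-endian digits of m right to left,
-- with incoming carry c ∈ {0,1}; a slot of value ≥ 5 sends a carry to the next slot
def Hc (m c : Int) : Int :=
  if _h : 10 ≤ m then Hc (m / 10) (if 5 ≤ m % 10 + c then 1 else 0) else m + c
termination_by m.toNat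
decreasing_by omega

-- 10^(number of digits of m − 1)
def tenpow (m : Int) : Int :=
  if _h : 10 ≤ m then 10 * tenpow (m / 10) else 1
termination_by m.toNat
decreasing_by omega

theorem toDigitsCore_append (f : Nat) : ∀ (n : Nat) (ds : List Char),
    Nat.toDigitsCore 10 f n ds = Nat.toDigitsCore 10 f n [] ++ ds := by
  induction f with
  | zero => intro n ds; simp [Nat.toDigitsCore]
  | succ f ih =>
    intro n ds
    simp only [Nat.toDigitsCore]
    by_cases h : n / 10 = 0
    · simp [h]
    · simp only [h]
      rw [ih (n / 10) [Nat.digitChar (n % 10)], ih (n / 10) (Nat.digitChar (n % 10) :: ds)]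
      simp

theorem toDigitsCore_fuel (N : Nat) : ∀ (n : Nat), n ≤ N → ∀ (f f' : Nat) (ds : List Char),
    n < f → n < f' → Nat.toDigitsCore 10 f n ds = Nat.toDigitsCore 10 f' n ds := by
  induction N with
  | zero =>
    intro n hn f f' ds hf hf'
    interval_cases n
    obtain ⟨f, rfl⟩ : ∃ g, f = g + 1 := ⟨f - 1, by omega⟩
    obtain ⟨f', rfl⟩ : ∃ g, f' = g + 1 := ⟨f' - 1, by omega⟩
    simp [Nat.toDigitsCore]
  | succ N ih =>
    intro n hn f f' ds hf hf'
    obtain ⟨f, rfl⟩ : ∃ g, f = g + 1 := ⟨f - 1, by omega⟩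
    obtain ⟨f', rfl⟩ : ∃ g, f' = g + 1 := ⟨f' - 1, by omega⟩
    simp only [Nat.toDigitsCore]
    by_cases h : n / 10 = 0
    · simp [h]
    · simp only [h]
      exact ih (n / 10) (by omega) f f' _ (by omega) (by omega)

theorem toDigits_step (n : Nat) (h : 10 ≤ n) :
    Nat.toDigits 10 n = Nat.toDigits 10 (n / 10) ++ [Nat.digitChar (n % 10)] := by
  unfold Nat.toDigits
  conv_lhs => rw [show n + 1 = (n - 1) + 1 + 1 by omega]
  rw [show Nat.toDigitsCore 10 ((n-1) + 1 + 1) n [] =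
      if n / 10 = 0 then [Nat.digitChar (n % 10)]
      else Nat.toDigitsCore 10 ((n-1)+1) (n / 10) [Nat.digitChar (n % 10)] from rfl]
  rw [if_neg (by omega)]
  rw [toDigitsCore_fuel (n/10) (n/10) le_rfl ((n-1)+1) (n/10 + 1) _ (by omega) (by omega)]
  rw [toDigitsCore_append]

theorem toChars_single (d : Int) (h0 : 0 ≤ d) (h1 : d < 10) :
    PySem.Int.toChars d = [Nat.digitChar d.toNat] := by
  interval_cases d <;> decide

theorem toDigits_lt10 (k : Nat) (h : k < 10) : Nat.toDigits 10 k = [Nat.digitChar k] := by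
  interval_cases k <;> decide

theorem toChars_step (n : Int) (h : 10 ≤ n) :
    PySem.Int.toChars n = PySem.Int.toChars (n / 10) ++ PySem.Int.toChars (n % 10) := by
  have h1 : ¬ n < 0 := by omega
  have h2 : ¬ n / 10 < 0 := by omega
  have h3 : ¬ n % 10 < 0 := by omega
  simp only [PySem.Int.toChars, if_neg h1, if_neg h2, if_neg h3]
  rw [toDigits_step n.toNat (by omega)]
  have e1 : n.toNat / 10 = (n / 10).toNat := by omega
  have e2 : n.toNat % 10 = (n % 10).toNat := by omega
  rw [e1, e2, toDigits_lt10 ((n % 10).toNat) (by omega)]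

theorem toChars_mul_ten (t : Int) (h : 1 ≤ t) :
    PySem.Int.toChars (t * 10) = PySem.Int.toChars t ++ ['0'] := by
  rw [toChars_step (t * 10) (by omega)]
  rw [Int.mul_ediv_cancel t (by norm_num)]
  have : t * 10 % 10 = 0 := by omega
  rw [this]
  rfl

theorem toChars_mul_pow (L : Nat) (t : Int) (h : 1 ≤ t) :
    PySem.Int.toChars (t * 10 ^ L) = PySem.Int.toChars t ++ List.replicate L '0' := by
  induction L with
  | zero => simp
  | succ L ih =>
    have : t * 10 ^ (L + 1) = (t * 10 ^ L) * 10 := by ring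
    rw [this, toChars_mul_ten _ (by have hp : (1:ℤ) ≤ 10 ^ L := one_le_pow₀ (by norm_num); nlinarith), ih]
    simp [List.replicate_succ']

theorem tenpow_eq (N : Nat) : ∀ (m : Int), 0 ≤ m → m.toNat ≤ N →
    10 * tenpow m = 10 ^ (PySem.Int.toChars m).length := by
  induction N with
  | zero =>
    intro m h0 hN
    have : m = 0 := by omega
    subst this
    rw [tenpow, toChars_single 0 (by omega) (by omega)]
    norm_num
  | succ N ih =>
    intro m h0 hN
    by_cases h : 10 ≤ m
    · rw [tenpow, dif_pos h, toChars_step m h,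
        toChars_single (m % 10) (by omega) (by omega)]
      rw [List.length_append]
      have := ih (m / 10) (by omega) (by omega)
      simp only [List.length_cons, List.length_nil]
      rw [pow_succ]
      rw [← this]
      ring
    · rw [tenpow, dif_neg h, toChars_single m h0 (by omega)]
      norm_num

theorem Hc_pos (N : Nat) : ∀ (m c : Int), 1 ≤ m → 0 ≤ c → m.toNat ≤ N → 1 ≤ Hc m c := by
  induction N with
  | zero => intro m c h1 h2 hN; omega
  | succ N ih =>
    intro m c h1 h2 hN
    by_cases h : 10 ≤ m
    · rw [Hc, dif_pos h]
      exact ih _ _ (by omega) (by split <;> omega) (by omega)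
    · rw [Hc, dif_neg h]; omega

theorem pyIntD_toStr (x : Int) (h0 : 0 ≤ x) (h1 : x ≤ 10) : pyIntD (PySem.Int.toStr x) = x := by
  interval_cases x <;> decide

theorem roundLoop_zero (l : List String) : roundLoop l 0 = l := rfl

theorem roundLoop_succ (l : List String) (i : Nat) :
    roundLoop l (i + 1) =
    roundLoop ((if 5 ≤ pyIntD (l.getD (i+1) "") then
        l.set i (PySem.Int.toStr (pyIntD (l.getD i "") + 1)) else l).set (i+1) "0") i := rfl

theorem roundLoop_base (m : Int) (h0 : 0 ≤ m) (h1 : m < 10) (x : Int)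
    (hx0 : 0 ≤ x) (hx1 : x ≤ 10) (k : Nat) :
    roundLoop ((PySem.Int.toChars m).map (fun c => String.ofList [c]) ++
        PySem.Int.toStr x :: List.replicate k "0") ((PySem.Int.toChars m).length)
    = PySem.Int.toStr (Hc m (if 5 ≤ x then 1 else 0)) ::
        List.replicate ((PySem.Int.toChars m).length + k) "0" := by
  have hsm : String.ofList [Nat.digitChar m.toNat] = PySem.Int.toStr m := by
    rw [show PySem.Int.toStr m = String.ofList (PySem.Int.toChars m) from rfl, toChars_single m h0 h1]
  rw [toChars_single m h0 h1]
  simp only [List.map_cons, List.map_nil, List.length_cons, List.length_nil, hsm,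
    List.singleton_append]
  rw [roundLoop_succ (PySem.Int.toStr m :: PySem.Int.toStr x :: List.replicate k "0") 0]
  simp only [List.getD_cons_succ, List.getD_cons_zero]
  rw [pyIntD_toStr x hx0 hx1, pyIntD_toStr m h0 (by omega)]
  by_cases hx : 5 ≤ x
  · rw [if_pos hx]
    simp only [List.set_cons_zero, List.set_cons_succ]
    rw [roundLoop_zero]
    rw [show Hc m (if 5 ≤ x then 1 else 0) = m + 1 from by rw [Hc, dif_neg (by omega), if_pos hx]]
    simp [List.replicate_succ, Nat.add_comm]
  · rw [if_neg hx]
    simp only [List.set_cons_succ, List.set_cons_zero]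
    rw [roundLoop_zero]
    rw [show Hc m (if 5 ≤ x then 1 else 0) = m from by
      rw [Hc, dif_neg (by omega), if_neg hx]; omega]
    simp [List.replicate_succ, Nat.add_comm]

theorem roundLoop_spec (N : Nat) : ∀ (m : Int), 0 ≤ m → m.toNat ≤ N →
    ∀ (x : Int), 0 ≤ x → x ≤ 10 → ∀ (k : Nat),
    roundLoop ((PySem.Int.toChars m).map (fun c => String.ofList [c]) ++
        PySem.Int.toStr x :: List.replicate k "0") ((PySem.Int.toChars m).length)
    = PySem.Int.toStr (Hc m (if 5 ≤ x then 1 else 0)) ::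
        List.replicate ((PySem.Int.toChars m).length + k) "0" := by
  induction N with
  | zero =>
    intro m h0 hN x hx0 hx1 k
    exact roundLoop_base m h0 (by omega) x hx0 hx1 k
  | succ N ih =>
    intro m h0 hN x hx0 hx1 k
    by_cases h : 10 ≤ m
    · rw [toChars_step m h, toChars_single (m % 10) (by omega) (by omega)]
      rw [List.map_append]
      have hfd : String.ofList [Nat.digitChar (m % 10).toNat] = PySem.Int.toStr (m % 10) := by
        rw [show PySem.Int.toStr (m % 10) = String.ofList (PySem.Int.toChars (m % 10)) from rfl,
          toChars_single (m % 10) (by omega) (by omega)]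
      set A := (PySem.Int.toChars (m / 10)).map (fun c => String.ofList [c]) with hA
      simp only [List.map_cons, List.map_nil, hfd, List.append_assoc, List.singleton_append,
        List.length_append, List.length_cons, List.length_nil]
      have hlen : A.length = (PySem.Int.toChars (m / 10)).length := by rw [hA, List.length_map]
      rw [show (PySem.Int.toChars (m / 10)).length + (0 + 1) = A.length + 1 by omega]
      rw [roundLoop_succ (A ++ PySem.Int.toStr (m % 10) :: PySem.Int.toStr x :: List.replicate k "0") A.length]
      rw [List.getD_append_right A _ "" (A.length + 1) (by omega),
          List.getD_append_right A _ "" A.length (by omega)]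
      simp only [Nat.add_sub_cancel_left, Nat.sub_self, List.getD_cons_succ, List.getD_cons_zero]
      rw [pyIntD_toStr x hx0 hx1, pyIntD_toStr (m % 10) (by omega) (by omega)]
      by_cases hx : 5 ≤ x
      · rw [if_pos hx]
        rw [List.set_append_right A.length _ (by omega),
            List.set_append_right (A.length + 1) _ (by omega)]
        simp only [Nat.sub_self, Nat.add_sub_cancel_left, List.set_cons_zero, List.set_cons_succ]
        rw [show ("0" : String) :: List.replicate k "0" = List.replicate (k + 1) "0" from
          (List.replicate_succ (a := ("0":String)) (n := k)).symm]
        rw [hlen]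
        rw [ih (m / 10) (by omega) (by omega) (m % 10 + 1) (by omega) (by omega) (k + 1)]
        rw [show Hc m (if 5 ≤ x then 1 else 0) = Hc (m / 10) (if 5 ≤ m % 10 + 1 then 1 else 0) from by
          rw [Hc, dif_pos h, if_pos hx]]
        rw [show (PySem.Int.toChars (m / 10)).length + (0 + 1) + k
            = (PySem.Int.toChars (m / 10)).length + (k + 1) by omega]
      · rw [if_neg hx]
        rw [List.set_append_right (A.length + 1) _ (by omega)]
        simp only [Nat.add_sub_cancel_left, List.set_cons_succ, List.set_cons_zero]
        rw [show ("0" : String) :: List.replicate k "0" = List.replicate (k + 1) "0" from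
          (List.replicate_succ (a := ("0":String)) (n := k)).symm]
        rw [hlen]
        rw [ih (m / 10) (by omega) (by omega) (m % 10) (by omega) (by omega) (k + 1)]
        rw [show Hc m (if 5 ≤ x then 1 else 0) = Hc (m / 10) (if 5 ≤ m % 10 + 0 then 1 else 0) from by
          rw [Hc, dif_pos h, if_neg hx]]
        rw [show (PySem.Int.toChars (m / 10)).length + (0 + 1) + k
            = (PySem.Int.toChars (m / 10)).length + (k + 1) by omega]
        rw [show m % 10 + 0 = m % 10 by omega]
    · exact roundLoop_base m h0 (by omega) x hx0 hx1 k

theorem altLoop_spec (N : Nat) : ∀ (m c : Int), 0 ≤ m → (c = 0 ∨ c = 1) → m.toNat ≤ N →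
    ∀ (f : Nat) (mult : Int), (m + c).toNat < f →
    (altLoop f (m + c) mult).1 * (altLoop f (m + c) mult).2 = Hc m c * (tenpow m * mult) := by
  induction N with
  | zero =>
    intro m c h0 hc hN f mult hf
    obtain ⟨f, rfl⟩ : ∃ g, f = g + 1 := ⟨f - 1, by omega⟩
    rw [altLoop, if_neg (by omega)]
    rw [Hc, dif_neg (by omega), tenpow, dif_neg (by omega)]
    ring
  | succ N ih =>
    intro m c h0 hc hN f mult hf
    obtain ⟨f, rfl⟩ : ∃ g, f = g + 1 := ⟨f - 1, by omega⟩
    by_cases hlt : m + c < 10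
    · -- loop exits immediately
      rw [altLoop, if_neg (by omega)]
      rw [Hc, dif_neg (by omega), tenpow, dif_neg (by omega)]
      ring
    · -- one more iteration
      have hm10 : 10 ≤ m + c := by omega
      rw [altLoop, if_pos hm10]
      simp only [PySem.Int.mod, PySem.Int.floordiv, Int.fmod_eq_emod, Int.fdiv_eq_ediv]
      rw [if_pos (by norm_num : (0:ℤ) ≤ 10 ∨ (10:ℤ) ∣ (m+c)), if_pos (by norm_num : (0:ℤ) ≤ 10 ∨ (10:ℤ) ∣ (m+c))]
      by_cases hm : 10 ≤ m
      · -- recurse via the IH on m / 10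
        have hstep : (if 5 ≤ (m + c) % 10 + 0 then (m + c) / 10 + 1 else (m + c) / 10)
            = m / 10 + (if 5 ≤ m % 10 + c then 1 else 0) := by
          rcases hc with rfl | rfl <;> split <;> split <;> omega
        have hkey : (if 5 ≤ (m + c) % 10 + 0 then (m + c) / 10 - 0 + 1 else (m + c) / 10 - 0)
            = m / 10 + (if 5 ≤ m % 10 + c then 1 else 0) := by
          rcases hc with rfl | rfl <;> split <;> split at hstep <;> split at hstep <;> omega
        rw [hkey]
        rw [ih (m / 10) (if 5 ≤ m % 10 + c then 1 else 0) (by omega)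
          (by split <;> omega) (by omega) f (mult * 10) (by split <;> omega)]
        rw [show Hc m c = Hc (m / 10) (if 5 ≤ m % 10 + c then 1 else 0) from by
              rw [Hc, dif_pos hm],
            show tenpow m = 10 * tenpow (m / 10) from by rw [tenpow, dif_pos hm]]
        ring
      · -- m = 9, c = 1 : the carry creates a new leading digit and the loop runs once more
        have hm9 : m = 9 := by omega
        have hc1 : c = 1 := by omega
        subst hm9; subst hc1
        norm_num
        obtain ⟨f, rfl⟩ : ∃ g, f = g + 1 := ⟨f - 1, by omega⟩
        rw [altLoop, if_neg (by norm_num)]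
        rw [Hc, dif_neg (by norm_num), tenpow, dif_neg (by norm_num)]
        ring

theorem altLoop_succ (f : Nat) (n mult : Int) :
    altLoop (f + 1) n mult =
    if 10 ≤ n then
      altLoop f (if 5 ≤ PySem.Int.mod n 10 then PySem.Int.floordiv n 10 + 1
                 else PySem.Int.floordiv n 10) (mult * 10)
    else (n, mult) := rfl

theorem chars_join_zeros (L : Nat) : ∀ (p : List Char),
    PySem.Chars.join [] (p :: List.replicate L ['0']) = p ++ List.replicate L '0' := by
  induction L with
  | zero => intro p; simp [PySem.Chars.join_singleton]
  | succ L ih =>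
    intro p
    rw [List.replicate_succ, PySem.Chars.join_cons_cons, ih ['0']]
    simp [List.replicate_succ]

-- ===== VERDICT (by name: the statement is the Claim_ definition above) =====
theorem rounders_spec : Claim_equal_rounders := by
  intro value _hdom hpre
  have h0 : (0:ℤ) ≤ value := hpre
  unfold Spec_rounders rounders rounders_alt
  simp only [PySem.Int.toList_toStr]
  obtain ⟨f, hfuel⟩ : ∃ g, value.toNat + 1 = g + 1 := ⟨value.toNat, rfl⟩
  rw [hfuel]
  by_cases h : 10 ≤ value
  · -- the loop runs: value has at least two digits
    have hq0 : (1:ℤ) ≤ value / 10 := by omega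
    set c0 : ℤ := if 5 ≤ value % 10 then 1 else 0 with hc0
    set t : ℤ := Hc (value / 10) c0 with ht
    set L : Nat := (PySem.Int.toChars (value / 10)).length with hL
    have ht1 : 1 ≤ t := Hc_pos ((value / 10).toNat) (value / 10) c0 hq0 (by rw [hc0]; split <;> omega) le_rfl
    -- A side
    rw [toChars_step value h, toChars_single (value % 10) (by omega) (by omega), List.map_append]
    have hfd : String.ofList [Nat.digitChar ((value % 10)).toNat] = PySem.Int.toStr (value % 10) := by
      rw [show PySem.Int.toStr (value % 10) = String.ofList (PySem.Int.toChars (value % 10)) from rfl,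
        toChars_single (value % 10) (by omega) (by omega)]
    simp only [List.map_cons, List.map_nil, hfd]
    rw [show (PySem.Int.toChars (value / 10)).map (fun c => String.ofList [c]) ++ [PySem.Int.toStr (value % 10)]
        = (PySem.Int.toChars (value / 10)).map (fun c => String.ofList [c]) ++
          PySem.Int.toStr (value % 10) :: List.replicate 0 "0" from by simp]
    have hidx : ((PySem.Int.toChars (value / 10)).map (fun c => String.ofList [c]) ++
        PySem.Int.toStr (value % 10) :: List.replicate 0 "0").length - 1 = L := by
      simp [hL]
    rw [hidx, show L = (PySem.Int.toChars (value / 10)).length from hL,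
      roundLoop_spec ((value / 10).toNat) (value / 10) (by omega) le_rfl (value % 10) (by omega) (by omega) 0]
    -- B side: unfold one loop iteration, then the invariant
    rw [altLoop_succ, if_pos h]
    have hmodeq : PySem.Int.mod value 10 = value % 10 := by
      rw [PySem.Int.mod, Int.fmod_eq_emod, if_pos (by norm_num)]; ring
    have hdiveq : PySem.Int.floordiv value 10 = value / 10 := by
      rw [PySem.Int.floordiv, Int.fdiv_eq_ediv, if_pos (by norm_num)]; ring
    rw [hmodeq, hdiveq,
      show (if 5 ≤ value % 10 then value / 10 + 1 else value / 10) = value / 10 + c0 from by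
        rw [hc0]; split <;> ring]
    rw [altLoop_spec ((value / 10).toNat) (value / 10) c0 (by omega)
      (by rw [hc0]; split <;> simp) le_rfl f (1 * 10)
      (by rw [hc0]; split <;> omega)]
    -- both sides are String.ofList of the same character list
    rw [show Hc (value / 10) c0 = t from ht.symm]
    have hten : tenpow (value / 10) * (1 * 10) = 10 ^ L := by
      have := tenpow_eq ((value / 10).toNat) (value / 10) (by omega) le_rfl
      rw [hL]; omega
    rw [hten]
    rw [show PySem.Str.join "" (PySem.Int.toStr t :: List.replicate ((PySem.Int.toChars (value / 10)).length + 0) "0")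
        = String.ofList (PySem.Chars.join [] ((PySem.Int.toStr t).toList :: List.replicate L ['0'])) from by
      simp [PySem.Str.join, hL, List.map_replicate]]
    rw [chars_join_zeros L, PySem.Int.toList_toStr,
      show PySem.Int.toChars t ++ List.replicate L '0' = PySem.Int.toChars (t * 10 ^ L) from
        (toChars_mul_pow L t ht1).symm]
    rfl
  · -- single digit: the loop body never runs on either side
    rw [toChars_single value h0 (by omega)]
    have hsm : String.ofList [Nat.digitChar value.toNat] = PySem.Int.toStr value := by
      rw [show PySem.Int.toStr value = String.ofList (PySem.Int.toChars value) from rfl,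
        toChars_single value h0 (by omega)]
    simp only [List.map_cons, List.map_nil, hsm, List.length_cons, List.length_nil]
    rw [show (1 : Nat) - 1 = 0 from rfl, roundLoop_zero]
    rw [altLoop_succ, if_neg h]
    rw [show PySem.Str.join "" [PySem.Int.toStr value]
        = String.ofList (PySem.Chars.join [] [(PySem.Int.toStr value).toList]) from by
      simp [PySem.Str.join]]
    rw [PySem.Chars.join_singleton, PySem.Int.toList_toStr]
    rw [show value * 1 = value from by ring]
    rfl
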